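-- pv_equiv track=rewrite | github.com/jacopotdsc/MisinfoScarping | nlp-module.py | extract_main_text
-- ===== SOURCE A (Python) =====
-- START_MAIN_TEXT = "<div class=\"edgtf-post-text-main\">"
--
-- END_MAIN_TEXT   = "<div class=\"edgtf-post-info-bottom clearfix\">"
--
-- HTML_TEXT_TAG   = "<p>"
--
-- def extract_main_text(html_code):
--
--     my_text = ''
--
--     start_copy = False
--     for line in html_code:
--
--         if START_MAIN_TEXT in line:
--             start_copy = True
--
--         if END_MAIN_TEXT in line:
--             start_copy = False
--             break
--
--         if start_copy == True and HTML_TEXT_TAG in line: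
--             my_text += line
--
--     return my_text
-- ===== SOURCE B (Python) =====
-- START_MAIN_TEXT = "<div class=\"edgtf-post-text-main\">"
-- END_MAIN_TEXT   = "<div class=\"edgtf-post-info-bottom clearfix\">"
-- HTML_TEXT_TAG   = "<p>"
--
-- def extract_main_text(html_code):
--     end = next((i for i, l in enumerate(html_code) if END_MAIN_TEXT in l),
--                len(html_code))
--     start = next((i for i, l in enumerate(html_code) if START_MAIN_TEXT in l),
--                  None)
--     if start is None or start >= end:
--         return ''
--     return ''.join(l for l in html_code[start:end] if HTML_TEXT_TAG in l)
-- ===== Notes on version B (the rewrite author's own statement) =====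
-- stated objective: alternative
-- what changed: B first locates the END and START marker indices with two independent scans, then slices the region html_code[start:end] and joins its <p> lines, instead of A's single stateful start_copy-flag loop with break.
import Mathlib
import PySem

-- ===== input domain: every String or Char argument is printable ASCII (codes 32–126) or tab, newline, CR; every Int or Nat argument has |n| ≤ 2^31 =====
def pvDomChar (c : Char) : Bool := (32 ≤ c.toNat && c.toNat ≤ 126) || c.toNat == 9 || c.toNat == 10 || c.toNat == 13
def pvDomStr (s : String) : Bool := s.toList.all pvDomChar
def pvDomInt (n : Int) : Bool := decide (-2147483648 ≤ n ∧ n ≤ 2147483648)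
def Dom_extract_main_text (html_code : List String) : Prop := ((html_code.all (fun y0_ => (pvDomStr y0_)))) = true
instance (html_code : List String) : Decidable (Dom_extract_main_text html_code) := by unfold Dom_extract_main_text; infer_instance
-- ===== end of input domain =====

-- B replaces A's stateful start_copy-flag loop by locating the END and START marker indices
-- with two independent scans and then slicing/joining the region (alternative decomposition; same cost).

def pvSTART : String := "<div class=\"edgtf-post-text-main\">"
def pvEND : String := "<div class=\"edgtf-post-info-bottom clearfix\">"
def pvTAG : String := "<p>"

-- ===== PORT A =====
-- loop with start_copy flag and break
def extract_main_text_go (lines : List String) (start_copy : Bool) (my_text : String) : String :=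
  match lines with
  | [] => my_text
  | line :: rest =>
    let sc := if PySem.Str.isIn pvSTART line then true else start_copy
    if PySem.Str.isIn pvEND line then my_text   -- break (start_copy := false is dead here)
    else extract_main_text_go rest sc
          (if sc && PySem.Str.isIn pvTAG line then my_text ++ line else my_text)

def extract_main_text (html_code : List String) : String :=
  extract_main_text_go html_code false ""

-- ===== PORT B =====
-- end = first index whose line contains END (default len); start = first index containing START (None → "");
-- then join the <p>-lines of the slice html_code[start:end]
def extract_main_text_alt (html_code : List String) : String :=
  let endIdx := (html_code.findIdx? (fun l => PySem.Str.isIn pvEND l)).getD html_code.length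
  match html_code.findIdx? (fun l => PySem.Str.isIn pvSTART l) with
  | none => ""
  | some s =>
    if s ≥ endIdx then ""
    else String.join (((html_code.take endIdx).drop s).filter (fun l => PySem.Str.isIn pvTAG l))

-- ===== PRECONDITION & SPEC =====
def Spec_extract_main_text (html_code : List String) (out : String) : Prop := out = extract_main_text_alt html_code
instance (html_code : List String) (out : String) : Decidable (Spec_extract_main_text html_code out) := by unfold Spec_extract_main_text; infer_instance

-- ===== CLAIM (what is proved, stated in full; the proofs are below) =====
def Claim_equal_extract_main_text : Prop := ∀ (html_code : List String), Dom_extract_main_text html_code → Spec_extract_main_text html_code (extract_main_text html_code)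

-- ===== LEMMAS AND PROOFS =====

-- proof-only intermediate form: truncate at END, skip to START, keep <p> lines
def pvPipe (l : List String) : String :=
  String.join (((l.takeWhile (fun x => !PySem.Str.isIn pvEND x)).dropWhile
      (fun x => !PySem.Str.isIn pvSTART x)).filter (fun x => PySem.Str.isIn pvTAG x))

theorem pvFoldlAppend (l : List String) (a : String) :
    l.foldl (fun r s => r ++ s) a = a ++ l.foldl (fun r s => r ++ s) "" := by
  induction l generalizing a with
  | nil => simp
  | cons x t ih =>
    simp only [List.foldl]
    rw [ih (a ++ x), ih ("" ++ x)]
    simp [String.append_assoc]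

theorem pvJoinNil : String.join ([] : List String) = "" := rfl

theorem pvJoinCons (x : String) (l : List String) :
    String.join (x :: l) = x ++ String.join l := by
  unfold String.join
  simp only [List.foldl]
  rw [pvFoldlAppend]
  simp

-- once the flag is true, A's loop collects <p>-lines up to (excluding) the END line
theorem extract_main_text_go_true (l : List String) (acc : String) :
    extract_main_text_go l true acc
      = acc ++ String.join ((l.takeWhile (fun x => !PySem.Str.isIn pvEND x)).filter
          (fun x => PySem.Str.isIn pvTAG x)) := by
  induction l generalizing acc with
  | nil => simp [extract_main_text_go, pvJoinNil]
  | cons x rest ih =>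
    by_cases hE : PySem.Str.isIn pvEND x
    · simp [extract_main_text_go, PySem.Str.isIn] at hE ⊢
      simp [hE, pvJoinNil]
    · by_cases hT : PySem.Str.isIn pvTAG x
      · simp [extract_main_text_go, PySem.Str.isIn] at hE hT ⊢
        simp [hE, hT, ih, pvJoinCons, String.append_assoc]
      · simp [extract_main_text_go, PySem.Str.isIn] at hE hT ⊢
        simp [hE, hT, ih]

-- before the flag is set, A's loop computes the pipeline form
theorem extract_main_text_go_false (l : List String) (acc : String) :
    extract_main_text_go l false acc = acc ++ pvPipe l := by
  induction l generalizing acc with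
  | nil => simp [extract_main_text_go, pvPipe, pvJoinNil]
  | cons x rest ih =>
    by_cases hE : PySem.Str.isIn pvEND x
    · simp [extract_main_text_go, pvPipe, PySem.Str.isIn] at hE ⊢
      simp [hE, pvJoinNil]
    · by_cases hS : PySem.Str.isIn pvSTART x
      · by_cases hT : PySem.Str.isIn pvTAG x
        · simp [extract_main_text_go, pvPipe, PySem.Str.isIn] at hE hS hT ⊢
          simp [hE, hS, hT, extract_main_text_go_true, pvJoinCons, String.append_assoc,
            PySem.Str.isIn]
        · simp [extract_main_text_go, pvPipe, PySem.Str.isIn] at hE hS hT ⊢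
          simp [hE, hS, hT, extract_main_text_go_true, PySem.Str.isIn]
      · simp [extract_main_text_go, PySem.Str.isIn] at hE hS ⊢
        simp [hE, hS, ih, pvPipe, PySem.Str.isIn]

-- take up to the first index satisfying p = takeWhile (!p)
theorem pvTakeFind {α : Type} (p : α → Bool) (l : List α) :
    l.take ((l.findIdx? p).getD l.length) = l.takeWhile (fun x => !p x) := by
  induction l with
  | nil => simp
  | cons x t ih =>
    by_cases h : p x
    · simp [List.findIdx?_cons, h]
    · cases hf : t.findIdx? p with
      | none => simp [List.findIdx?_cons, h, hf, List.take_succ_cons, ← ih, hf]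
      | some n => simp [List.findIdx?_cons, h, hf, List.take_succ_cons, ← ih, hf]

-- B's index/slice computation equals the pipeline form
theorem pvAltEqPipe (l : List String) : extract_main_text_alt l = pvPipe l := by
  induction l with
  | nil => rfl
  | cons x t ih =>
    simp only [extract_main_text_alt, pvPipe, PySem.Str.isIn, List.findIdx?_cons] at ih ⊢
    by_cases hE : PySem.Chars.isIn pvEND.toList x.toList
    · cases hS : t.findIdx? (fun l => PySem.Chars.isIn pvSTART.toList l.toList) with
      | none =>
        by_cases hSx : PySem.Chars.isIn pvSTART.toList x.toList <;> simp [hE, hS, hSx, pvJoinNil]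
      | some s =>
        by_cases hSx : PySem.Chars.isIn pvSTART.toList x.toList <;> simp [hE, hS, hSx, pvJoinNil]
    · by_cases hSx : PySem.Chars.isIn pvSTART.toList x.toList
      · cases hfE : t.findIdx? (fun l => PySem.Chars.isIn pvEND.toList l.toList) with
        | none =>
          have htf : List.takeWhile (fun x => !PySem.Chars.isIn pvEND.toList x.toList) t = t := by
            have h := pvTakeFind (fun l => PySem.Chars.isIn pvEND.toList l.toList) t
            simpa [hfE] using h.symm
          simp [hE, hSx, hfE, List.take_succ_cons, htf]
        | some n =>
          have htf := pvTakeFind (fun l => PySem.Chars.isIn pvEND.toList l.toList) t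
          simp [hfE] at htf
          simp [hE, hSx, hfE, List.take_succ_cons, htf]
      · cases hfS : t.findIdx? (fun l => PySem.Chars.isIn pvSTART.toList l.toList) with
        | none =>
          simp [hE, hSx, hfS, pvJoinNil] at ih ⊢
          exact ih
        | some s =>
          cases hfE : t.findIdx? (fun l => PySem.Chars.isIn pvEND.toList l.toList) with
          | none =>
            simp [hE, hSx, hfS, hfE, List.take_succ_cons, Nat.succ_le_succ_iff] at ih ⊢
            split_ifs at ih ⊢ with h1 <;> simp_all
          | some n =>
            simp [hE, hSx, hfS, hfE, List.take_succ_cons, Nat.succ_le_succ_iff] at ih ⊢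
            split_ifs at ih ⊢ with h1 <;> simp_all

-- ===== VERDICT (by name: the statement is the Claim_ definition above) =====
theorem extract_main_text_spec : Claim_equal_extract_main_text := by
  intro html _
  unfold Spec_extract_main_text extract_main_text
  simp [extract_main_text_go_false, pvAltEqPipe]
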